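-- pv_equiv track=rewrite | github.com/godblessforhimself/IPv6 | code_storage/classify_PM.py | scan_clusters
-- ===== SOURCE A (Python) =====
-- def scan_clusters(array, dist, kind='int'):
--     # scan continuous clusters
--     # if array is not sorted, it is useless
--     # dist 越大， cluster 数量越少， 包含的点越多
--     result=[]
--     i,count,current,start=0,0,array[0],array[0]
--     j = 0
--     while i < len(array):
--         delta=array[i]-current if kind=='int' else int(array[i], 16) - int(current, 16)
--         if i==0:
--             count+=1
--         elif delta>dist:
--             #if count>1:
--             result.append([j, i - 1, count])
--             count=1
--             start=array[i]
--             j=i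
--         else:
--             count+=1
--         current=array[i]
--         i+=1
--     #if count>1:
--     result.append([j, i - 1, count])
--     #result.sort(key=lambda x:x[2], reverse=True)
--     return result
-- ===== SOURCE B (Python) =====
-- def scan_clusters(array, dist, kind='int'):
--     # Two-pass decomposition: collect the gap-break indices, then assemble
--     # the [start, end, count] triples from consecutive boundaries.
--     if not array:
--         return []
--     vals = array if kind == 'int' else [int(x, 16) for x in array]
--     breaks = [i for i in range(1, len(vals)) if vals[i] - vals[i - 1] > dist]
--     bounds = [0] + breaks + [len(array)]
--     return [[b, e - 1, e - b] for b, e in zip(bounds, bounds[1:])]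
-- ===== Notes on version B (the rewrite author's own statement) =====
-- stated objective: simpler
-- what changed: Replaces A's fused running-state while-loop (count/current/start/j mutated per step) with a two-pass decomposition: first collect gap-break indices, then assemble each [start, end, count] triple directly from consecutive boundaries.
import Mathlib
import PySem

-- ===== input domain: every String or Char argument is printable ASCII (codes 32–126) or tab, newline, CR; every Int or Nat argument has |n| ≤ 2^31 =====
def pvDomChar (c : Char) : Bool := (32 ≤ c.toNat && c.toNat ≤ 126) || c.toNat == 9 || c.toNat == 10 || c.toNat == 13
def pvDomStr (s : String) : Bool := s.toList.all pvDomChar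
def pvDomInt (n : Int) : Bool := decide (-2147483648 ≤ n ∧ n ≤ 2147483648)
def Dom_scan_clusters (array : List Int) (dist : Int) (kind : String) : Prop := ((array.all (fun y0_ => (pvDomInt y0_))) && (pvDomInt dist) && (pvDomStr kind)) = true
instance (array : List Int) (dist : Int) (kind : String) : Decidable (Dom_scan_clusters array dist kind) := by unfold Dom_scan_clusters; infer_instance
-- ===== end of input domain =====

-- B replaces A's fused running-state scan with a break-indices-then-assembly decomposition (same O(n) cost); return-value equivalence only — neither mutates its arguments.

-- ===== PORT A =====
-- A's while loop as recursion on the index i; loop state (result, count, current, j).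
-- ('start' is assigned in A but never read afterwards, so it is not carried.)
def scan_clusters_loop (array : List Int) (dist : Int) (kind : String)
    (i : Nat) (result : List (List Int)) (count : Int) (current : Int) (j : Int) :
    List (List Int) × Int × Int :=
  if h : i < array.length then
    let ai := array[i]
    -- delta = array[i]-current if kind=='int' else int(array[i],16)-int(current,16)
    -- the else branch is a Python TypeError (base-16 parse of an int); unreachable under Pre_, modelled as 0
    let delta : Int := if kind == "int" then ai - current else 0
    if i == 0 then
      scan_clusters_loop array dist kind (i+1) result (count+1) ai j
    else if delta > dist then
      scan_clusters_loop array dist kind (i+1) (result ++ [[j, (i : Int) - 1, count]]) 1 ai (i : Int)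
    else
      scan_clusters_loop array dist kind (i+1) result (count+1) ai j
  else (result, count, j)
termination_by array.length - i

def scan_clusters (array : List Int) (dist : Int) (kind : String) : List (List Int) :=
  match array with
  | [] => []  -- Python raises IndexError here (array[0]); excluded by Pre_
  | a0 :: _ =>
    let t := scan_clusters_loop array dist kind 0 [] 0 a0 0
    t.1 ++ [[t.2.2, (array.length : Int) - 1, t.2.1]]

-- ===== PORT B =====
def scan_clusters_alt (array : List Int) (dist : Int) (kind : String) : List (List Int) :=
  match array with
  | [] => []
  | _ :: _ =>
    -- vals = array if kind == 'int' else [int(x,16) for x in array]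
    -- (the else branch is a Python TypeError on int elements; unreachable under Pre_, modelled as array)
    let vals := if kind == "int" then array else array
    let breaks := (PySem.List.pyRange 1 (vals.length : Int) 1).filter
      (fun i => PySem.List.pyGetD vals i 0 - PySem.List.pyGetD vals (i - 1) 0 > dist)
    let bounds := [(0 : Int)] ++ breaks ++ [(array.length : Int)]
    (bounds.zip (bounds.drop 1)).map (fun p => [p.1, p.2 - 1, p.2 - p.1])  -- bounds[1:] is drop 1

-- ===== PRECONDITION & SPEC =====
-- Pre_ excludes exactly the inputs where A raises: the empty list (IndexError on array[0])
-- and kind ≠ 'int' (TypeError: int(x, 16) applied to an int element).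
def Pre_scan_clusters (array : List Int) (dist : Int) (kind : String) : Prop :=
  array ≠ [] ∧ kind = "int"
instance (array : List Int) (dist : Int) (kind : String) : Decidable (Pre_scan_clusters array dist kind) := by unfold Pre_scan_clusters; infer_instance
def pvWitness_scan_clusters : List Int × Int × String := ([1, 2, 10], 3, "int")

def Spec_scan_clusters (array : List Int) (dist : Int) (kind : String) (out : List (List Int)) : Prop := out = scan_clusters_alt array dist kind
instance (array : List Int) (dist : Int) (kind : String) (out : List (List Int)) : Decidable (Spec_scan_clusters array dist kind out) := by unfold Spec_scan_clusters; infer_instance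

-- ===== CLAIM (what is proved, stated in full; the proofs are below) =====
def Claim_equal_scan_clusters : Prop := ∀ (array : List Int) (dist : Int) (kind : String), Dom_scan_clusters array dist kind → Pre_scan_clusters array dist kind → Spec_scan_clusters array dist kind (scan_clusters array dist kind)

-- ===== LEMMAS AND PROOFS =====

-- the break indices ≥ i, as Ints
def pvBreaks (array : List Int) (dist : Int) (i : Nat) : List Int :=
  (List.range' i (array.length - i)).foldr
    (fun k acc => if array.getD k 0 - array.getD (k - 1) 0 > dist then (k : Int) :: acc else acc) []

-- segments from boundary list b :: bs ++ [n]
def pvSegs (n : Int) : Int → List Int → List (List Int)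
  | b, [] => [[b, n - 1, n - b]]
  | b, x :: xs => [b, x - 1, x - b] :: pvSegs n x xs

lemma pvBreaks_last (array : List Int) (dist : Int) :
    pvBreaks array dist array.length = [] := by
  simp [pvBreaks]

lemma pvBreaks_step (array : List Int) (dist : Int) (i : Nat) (h : i < array.length) :
    pvBreaks array dist i =
      if array.getD i 0 - array.getD (i - 1) 0 > dist then
        (i : Int) :: pvBreaks array dist (i + 1)
      else pvBreaks array dist (i + 1) := by
  have hlen : array.length - i = (array.length - (i + 1)) + 1 := by omega
  rw [pvBreaks, hlen, List.range'_succ, List.foldr_cons, pvBreaks]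

lemma loop_start (array : List Int) (dist : Int) (kind : String) (h : 0 < array.length)
    (R : List (List Int)) (c cur : Int) (j : Int) :
    scan_clusters_loop array dist kind 0 R c cur j
      = scan_clusters_loop array dist kind 1 R (c + 1) array[0] j := by
  rw [scan_clusters_loop]
  simp [h]

lemma loopA (array : List Int) (dist : Int) :
    ∀ k i, array.length - i = k → 1 ≤ i → i ≤ array.length →
    ∀ (R : List (List Int)) (j : Int),
      (let t := scan_clusters_loop array dist "int" i R ((i : Int) - j) (array.getD (i - 1) 0) j
       t.1 ++ [[t.2.2, (array.length : Int) - 1, t.2.1]])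
      = R ++ pvSegs (array.length) j (pvBreaks array dist i) := by
  intro k
  induction k with
  | zero =>
    intro i hk h1 hle R j
    have hi : i = array.length := by omega
    subst hi
    rw [scan_clusters_loop]
    simp [pvBreaks_last, pvSegs]
  | succ m ih =>
    intro i hk h1 hle R j
    have hlt : i < array.length := by omega
    have hai : array[i] = array.getD i 0 := by
      simp [List.getD, List.getElem?_eq_getElem hlt]
    rw [scan_clusters_loop]
    have hi0 : (i == 0) = false := by simp; omega
    simp only [dif_pos hlt, hi0, Bool.false_eq_true, if_false, beq_self_eq_true, if_true]
    by_cases hc : array[i] - array.getD (i - 1) 0 > dist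
    · rw [if_pos hc]
      have e1 : ((i + 1 : Nat) : Int) - (i : Int) = 1 := by omega
      have ht := ih (i + 1) (by omega) (by omega) (by omega)
        (R ++ [[j, (i : Int) - 1, (i : Int) - j]]) (i : Int)
      simp only [Nat.add_sub_cancel, e1, ← hai] at ht
      rw [ht, pvBreaks_step array dist i hlt, if_pos (hai ▸ hc)]
      simp [pvSegs]
    · rw [if_neg hc]
      have e2 : (i : Int) - j + 1 = ((i + 1 : Nat) : Int) - j := by omega
      have ht := ih (i + 1) (by omega) (by omega) (by omega) R j
      simp only [Nat.add_sub_cancel, ← hai] at ht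
      rw [e2, ht, pvBreaks_step array dist i hlt, if_neg (by rw [← hai]; exact hc)]

lemma sideA (a0 : Int) (rest : List Int) (dist : Int) :
    scan_clusters (a0 :: rest) dist "int"
      = pvSegs ((a0 :: rest).length) 0 (pvBreaks (a0 :: rest) dist 1) := by
  have h := loopA (a0 :: rest) dist (rest.length) 1 (by simp) le_rfl (by simp) [] 0
  simp only [Nat.sub_self, List.getD_cons_zero, List.nil_append] at h
  show (let t := scan_clusters_loop (a0 :: rest) dist "int" 0 [] 0 a0 0
        t.1 ++ [[t.2.2, (((a0 :: rest).length : Nat) : Int) - 1, t.2.1]]) = _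
  rw [loop_start (a0 :: rest) dist "int" (by simp) [] 0 a0 0]
  simpa using h

lemma breaksB (array : List Int) (dist : Int) :
    ∀ k i, array.length - i = k → 1 ≤ i →
      (PySem.List.pyRange (i : Int) (array.length : Int) 1).filter
        (fun t => PySem.List.pyGetD array t 0 - PySem.List.pyGetD array (t - 1) 0 > dist)
      = pvBreaks array dist i := by
  intro k
  induction k with
  | zero =>
    intro i hk h1
    have hle : array.length ≤ i := by omega
    rw [PySem.List.pyRange_one_eq_nil (by exact_mod_cast hle)]
    rw [pvBreaks, hk]
    simp
  | succ m ih =>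
    intro i hk h1
    have hlt : i < array.length := by omega
    rw [PySem.List.pyRange_one_cons (by exact_mod_cast hlt), List.filter_cons]
    have hcast : (i : Int) + 1 = ((i + 1 : Nat) : Int) := by omega
    have hm1 : (i : Int) - 1 = ((i - 1 : Nat) : Int) := by omega
    rw [hcast, ih (i + 1) (by omega) (by omega), pvBreaks_step array dist i hlt]
    simp only [hm1, PySem.List.pyGetD_natCast]
    by_cases hc : array.getD i 0 - array.getD (i - 1) 0 > dist
    · rw [if_pos (decide_eq_true hc), if_pos hc]
    · rw [if_neg (by simpa using hc), if_neg hc]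

lemma segsB (n : Int) :
    ∀ (bs : List Int) (b : Int),
      ((([b] ++ bs ++ [n]).zip (([b] ++ bs ++ [n]).drop 1)).map
        (fun p => [p.1, p.2 - 1, p.2 - p.1])) = pvSegs n b bs := by
  intro bs
  induction bs with
  | nil => intro b; simp [pvSegs]
  | cons x xs ih =>
    intro b
    have h := ih x
    simp only [List.cons_append, List.nil_append, List.drop_succ_cons, List.drop_zero] at h ⊢
    rw [List.zip_cons_cons, List.map_cons, pvSegs]
    exact congrArg _ h

lemma sideB (a0 : Int) (rest : List Int) (dist : Int) :
    scan_clusters_alt (a0 :: rest) dist "int"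
      = pvSegs ((a0 :: rest).length) 0 (pvBreaks (a0 :: rest) dist 1) := by
  simp only [scan_clusters_alt, ite_self]
  have hbr := breaksB (a0 :: rest) dist (rest.length) 1 (by simp) le_rfl
  rw [Nat.cast_one] at hbr
  rw [hbr]
  exact segsB ((a0 :: rest).length : Int) (pvBreaks (a0 :: rest) dist 1) 0

-- ===== VERDICT (by name: the statement is the Claim_ definition above) =====
theorem scan_clusters_spec : Claim_equal_scan_clusters := by
  intro array dist kind _ hpre
  obtain ⟨hne, hkind⟩ := hpre
  subst hkind
  cases array with
  | nil => exact absurd rfl hne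
  | cons a0 rest =>
    unfold Spec_scan_clusters
    rw [sideA, sideB]
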